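-- pv_equiv track=rewrite | github.com/Brian-ZhenLiu/Course_Project | NLP/txtRead.py | ruleTwo
-- ===== SOURCE A (Python) =====
-- def ruleTwo(word, dataLists):
--     count = 0
--     newWord = ""
--     allSign = ""
--     charList = list(word)
--     if isAlphanumeric(charList[0]) == False:
--         for i in range(len(charList)):
--             if isAlphanumeric(charList[i]) == False:
--                 allSign = allSign + charList[i]
--                 count = count + 1
--                 if i == len(charList) - 1:
--                     dataLists.append(allSign)
--                     break
--                 elif isAlphanumeric(charList[i + 1]) == True:
--                     for sign in list(allSign):
--                         dataLists.append(sign)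
--                     break
--         for i in range(count - 1, -1, -1):
--             charList.pop(i)
--     for letter in charList:
--         newWord = newWord + letter
--     return newWord
--
-- def isAlphanumeric(letter):
--     if 97 <= ord(letter.lower()) <= 122 or 48 <= ord(letter.lower()) <= 57:
--         return True
--     else:
--         return False
-- ===== SOURCE B (Python) =====
-- def ruleTwo(word, dataLists):
--     # NOTE: like A, this mutates dataLists in place; the proved equivalence is about the return value.
--     if _isAlnum(word[0]):
--         return ''.join(word)
--     n = len(word)
--     count = 1
--     while count < n and not _isAlnum(word[count]):
--         count += 1
--     prefix = ''.join(word[:count])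
--     if count == n:
--         dataLists.append(prefix)       # whole leading run reached the end: recorded as one string
--     else:
--         dataLists.extend(prefix)       # otherwise each leading sign recorded individually
--     return ''.join(word[count:])
--
-- def _isAlnum(c):
--     o = ord(c.lower())
--     return 97 <= o <= 122 or 48 <= o <= 57
-- ===== Notes on version B (the rewrite author's own statement) =====
-- stated objective: simpler
-- what changed: One forward run-length scan plus a single slice/join replaces A's index loop with lookahead break, the reversed pop(i) loop that rebuilds the list, and the char-by-char string concatenation.
-- outside the precondition, e.g. on ruleTwo('', []): A raises IndexError, B raises IndexError
import Mathlib
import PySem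

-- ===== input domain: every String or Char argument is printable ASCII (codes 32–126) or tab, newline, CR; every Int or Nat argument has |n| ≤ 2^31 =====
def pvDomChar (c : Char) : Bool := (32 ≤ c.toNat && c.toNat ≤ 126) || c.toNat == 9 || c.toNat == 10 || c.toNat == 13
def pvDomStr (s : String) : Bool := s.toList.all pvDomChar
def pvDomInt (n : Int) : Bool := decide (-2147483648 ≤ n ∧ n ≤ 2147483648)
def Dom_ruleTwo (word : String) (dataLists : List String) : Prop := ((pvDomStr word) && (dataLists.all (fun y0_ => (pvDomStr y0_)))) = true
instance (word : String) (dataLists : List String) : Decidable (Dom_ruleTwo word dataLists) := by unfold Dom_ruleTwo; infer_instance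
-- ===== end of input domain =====

-- B replaces A's index/lookahead loop, reversed pop loop and char-by-char rebuild with one run-length
-- scan and a slice (simpler decomposition). Both Pythons mutate dataLists identically; the theorem is
-- about the return value.

-- ===== PORT A =====
-- isAlphanumeric(letter): 97 <= ord(letter.lower()) <= 122 or 48 <= ord(letter.lower()) <= 57
def pvAlnum (c : Char) : Bool :=
  let o := (PySem.Chars.lowerChar c).toNat
  (97 ≤ o && o ≤ 122) || (48 ≤ o && o ≤ 57)

-- A's first for-loop (only `count` feeds the returned value; allSign/dataLists.append only mutate the argument)
def ruleTwoCount (cl : List Char) (i count : Nat) : Nat :=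
  if h : i < cl.length then
    if pvAlnum cl[i] = false then
      let count := count + 1
      if hl : i = cl.length - 1 then count          -- break
      else if pvAlnum (cl[i+1]'(by omega)) then count  -- break
      else ruleTwoCount cl (i+1) count
    else ruleTwoCount cl (i+1) count
  else count
termination_by cl.length - i

def ruleTwo (word : String) (dataLists : List String) : String :=
  let charList := word.toList
  match charList with
  | [] => ""   -- charList[0] raises IndexError in Python: excluded by Pre_
  | c :: _ =>
    let charList2 :=
      if pvAlnum c = false then
        let count := ruleTwoCount charList 0 0
        -- for i in range(count-1, -1, -1): charList.pop(i)
        (PySem.List.pyRange ((count : Int) - 1) (-1) (-1)).foldl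
          (fun l j => match PySem.List.pop? l j with | some r => r.2 | none => l) charList
      else charList
    -- for letter in charList: newWord = newWord + letter
    String.ofList (charList2.foldl (fun acc ch => acc ++ [ch]) [])

-- ===== PORT B =====
-- while count < n and not _isAlnum(word[count]): count += 1   — length of the run after word[0]
def pvRunLen (l : List Char) : Nat :=
  match l with
  | [] => 0
  | c :: t => if pvAlnum c then 0 else 1 + pvRunLen t

def ruleTwo_alt (word : String) (dataLists : List String) : String :=
  match word.toList with
  | [] => ""   -- word[0] raises IndexError in Python: excluded by Pre_
  | c :: rest =>
    if pvAlnum c then String.ofList (c :: rest)   -- ''.join(word)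
    else
      let count := 1 + pvRunLen rest
      String.ofList ((c :: rest).drop count)      -- ''.join(word[count:]); 0 ≤ count ≤ len, so the slice is drop

-- ===== PRECONDITION & SPEC =====
-- Pre_ excludes exactly the empty word, on which A (charList[0]) raises IndexError.
def Pre_ruleTwo (word : String) (dataLists : List String) : Prop := word.toList ≠ []
instance (word : String) (dataLists : List String) : Decidable (Pre_ruleTwo word dataLists) := by unfold Pre_ruleTwo; infer_instance
def pvWitness_ruleTwo : String × List String := ("!!a", ["x"])

def Spec_ruleTwo (word : String) (dataLists : List String) (out : String) : Prop := out = ruleTwo_alt word dataLists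
instance (word : String) (dataLists : List String) (out : String) : Decidable (Spec_ruleTwo word dataLists out) := by unfold Spec_ruleTwo; infer_instance

-- ===== CLAIM (what is proved, stated in full; the proofs are below) =====
def Claim_equal_ruleTwo : Prop := ∀ (word : String) (dataLists : List String), Dom_ruleTwo word dataLists → Pre_ruleTwo word dataLists → Spec_ruleTwo word dataLists (ruleTwo word dataLists)

-- ===== LEMMAS AND PROOFS =====

lemma pvRunLen_le (l : List Char) : pvRunLen l ≤ l.length := by
  induction l with
  | nil => simp [pvRunLen]
  | cons c t ih => simp only [pvRunLen, List.length_cons]; split <;> omega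

-- A's first loop computes count + 1 + (run length after position i)
lemma ruleTwoCount_eq (cl : List Char) : ∀ (fuel i count : Nat), cl.length - i ≤ fuel →
    (h : i < cl.length) → pvAlnum cl[i] = false →
    ruleTwoCount cl i count = count + 1 + pvRunLen (cl.drop (i+1)) := by
  intro fuel
  induction fuel with
  | zero => intro i count hf h hna; omega
  | succ n ih =>
    intro i count hf h hna
    rw [ruleTwoCount, dif_pos h, if_pos hna]
    by_cases hl : i = cl.length - 1
    · rw [dif_pos hl]
      have hd : cl.drop (i+1) = [] := List.drop_eq_nil_of_le (by omega)
      simp [hd, pvRunLen]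
    · rw [dif_neg hl]
      have h1 : i + 1 < cl.length := by omega
      have hdrop : cl.drop (i+1) = cl[i+1] :: cl.drop (i+1+1) := by
        rw [List.drop_eq_getElem_cons h1]
      by_cases hn : pvAlnum cl[i+1]
      · rw [if_pos hn, hdrop]
        simp [pvRunLen, hn]
      · rw [if_neg hn,
          ih (i+1) (count+1) (by omega) h1 (by simpa using hn), hdrop]
        simp only [pvRunLen, Bool.eq_false_iff.mpr hn, Bool.false_eq_true, if_false]
        omega

-- the pop loop `for i in range(count-1,-1,-1): charList.pop(i)` drops the first `count` elements
lemma popLoop_eq (count : Nat) : ∀ (cl : List Char), count ≤ cl.length →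
    (PySem.List.pyRange ((count : Int) - 1) (-1) (-1)).foldl
      (fun l j => match PySem.List.pop? l j with | some r => r.2 | none => l) cl = cl.drop count := by
  induction count with
  | zero =>
    intro cl _
    rw [PySem.List.pyRange_neg_one_eq_nil (by norm_num)]
    simp
  | succ n ih =>
    intro cl hle
    have hc : ((n + 1 : Nat) : Int) - 1 = ((n : Nat) : Int) := by push_cast; ring
    rw [hc, PySem.List.pyRange_neg_one_cons (by omega)]
    simp only [List.foldl_cons]
    have hn : n < cl.length := by omega
    rw [PySem.List.pop?_natCast cl n hn]
    rw [ih (cl.eraseIdx n) (by rw [List.length_eraseIdx_of_lt hn]; omega)]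
    rw [List.eraseIdx_eq_take_drop_succ]
    have hlen : (List.take n cl).length = n := List.length_take_of_le (le_of_lt hn)
    calc List.drop n (List.take n cl ++ List.drop (n+1) cl)
        = List.drop (List.take n cl).length (List.take n cl ++ List.drop (n+1) cl) := by rw [hlen]
      _ = List.drop (n+1) cl := List.drop_left

-- ===== VERDICT (by name: the statement is the Claim_ definition above) =====
theorem ruleTwo_spec : Claim_equal_ruleTwo := by
  intro word dataLists _ hpre
  unfold Spec_ruleTwo ruleTwo ruleTwo_alt
  cases hw : word.toList with
  | nil => exact absurd hw hpre
  | cons c rest =>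
    dsimp only
    by_cases hc : pvAlnum c
    · rw [if_neg (by simp [hc]), if_pos hc, PySem.List.foldl_append_singleton, List.nil_append]
    · rw [if_pos (by simpa using hc), if_neg hc,
        ruleTwoCount_eq (c :: rest) (c :: rest).length 0 0 (by omega) (by simp)
          (by simpa using hc)]
      simp only [Nat.zero_add, List.drop_succ_cons, List.drop_zero]
      rw [popLoop_eq (0 + 1 + pvRunLen rest) (c :: rest)
        (by simp only [List.length_cons]; have := pvRunLen_le rest; omega)]
      rw [PySem.List.foldl_append_singleton, List.nil_append]
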